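-- pv_equiv track=rewrite | github.com/JacobHerbstman/TIF | tasks/tif_pdf_projected_realized/code/extract_projected_realized_from_pdfs.py | keyword_positions
-- ===== SOURCE A (Python) =====
-- def keyword_positions(text, keywords):
--     positions = []
--     lower = text.lower()
--     for kw in keywords:
--         start = 0
--         while True:
--             idx = lower.find(kw, start)
--             if idx < 0:
--                 break
--             positions.append((idx, kw))
--             start = idx + 1
--     positions.sort(key=lambda x: x[0])
--     return positions
-- ===== SOURCE B (Python) =====
-- def keyword_positions(text, keywords):
--     # Position-major scan: walk the text once and emit matches in output order
--     # directly, so no per-keyword rescans and no final sort are needed.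
--     lower = text.lower()
--     return [(i, kw)
--             for i in range(len(lower) + 1)
--             for kw in keywords
--             if lower.startswith(kw, i)]
-- ===== Notes on version B (the rewrite author's own statement) =====
-- stated objective: alternative
-- what changed: keyword-major repeated str.find loops followed by a stable sort are replaced by a single position-major scan that emits matches already in output order (no sort at all)
import Mathlib
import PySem

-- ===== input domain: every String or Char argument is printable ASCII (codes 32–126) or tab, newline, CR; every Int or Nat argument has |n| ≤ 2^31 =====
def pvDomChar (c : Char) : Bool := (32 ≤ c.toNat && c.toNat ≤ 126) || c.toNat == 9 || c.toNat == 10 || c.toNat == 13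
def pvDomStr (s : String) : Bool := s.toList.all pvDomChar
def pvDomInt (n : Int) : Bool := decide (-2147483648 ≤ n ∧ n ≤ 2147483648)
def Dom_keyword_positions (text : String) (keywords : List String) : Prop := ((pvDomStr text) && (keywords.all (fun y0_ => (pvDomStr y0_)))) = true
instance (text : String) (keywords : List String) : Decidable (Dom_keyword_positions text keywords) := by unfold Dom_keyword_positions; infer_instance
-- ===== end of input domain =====

-- B replaces A's keyword-major repeated `str.find` loops plus a final stable sort by a single
-- position-major scan that emits matches already in output order (no sort); same results, similar cost.

-- ===== PORT A =====
-- termination fact for the while-loop port: a successful find lands in [start, len]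
theorem pvFindFrom_gt_len (s sub : List Char) (k : Nat) (h : s.length < k) :
    PySem.Chars.findFrom s sub (↑k) none = -1 := by
  have hk : ¬ ((k : Int) < 0) := by omega
  simp only [PySem.Chars.findFrom, if_neg hk]
  rw [if_pos (by exact_mod_cast h)]

theorem pvFindFrom_bounds (s sub : List Char) (k : Nat) (hk : k ≤ s.length + 1)
    (h : ¬ PySem.Chars.findFrom s sub (↑k) none < 0) :
    k ≤ (PySem.Chars.findFrom s sub (↑k) none).toNat ∧
      (PySem.Chars.findFrom s sub (↑k) none).toNat ≤ s.length := by
  by_cases hks : k ≤ s.length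
  · have hnc := PySem.Chars.findFrom_natCast s sub k hks
    have h1 : -1 ≤ PySem.Chars.find (List.drop k s) sub := PySem.Chars.neg_one_le_find _ _
    have h2 : PySem.Chars.find (List.drop k s) sub ≤ ((List.drop k s).length : Int) :=
      PySem.Chars.find_le_length _ _
    have hl : (List.drop k s).length = s.length - k := List.length_drop
    by_cases h3 : PySem.Chars.find (List.drop k s) sub = -1
    · rw [hnc, if_pos h3] at h; omega
    · rw [hnc, if_neg h3] at h ⊢; rw [hl] at h2; omega
  · exfalso; rw [pvFindFrom_gt_len s sub k (by omega)] at h; omega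

-- the `while True: idx = lower.find(kw, start); if idx < 0: break; append; start = idx + 1` loop
def kwLoopA (lowerL : List Char) (kw : String) (start : Nat)
    (hs : start ≤ lowerL.length + 1) : List (Int × String) :=
  let idx := PySem.Chars.findFrom lowerL kw.toList (↑start) none
  if h : idx < 0 then []
  else
    have hb := pvFindFrom_bounds lowerL kw.toList start hs h
    (idx, kw) :: kwLoopA lowerL kw (idx.toNat + 1) (by omega)
termination_by lowerL.length + 1 - start
decreasing_by omega

def keyword_positions (text : String) (keywords : List String) : List (Int × String) :=
  let lowerL := PySem.Chars.lower text.toList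
  let positions := keywords.foldl (fun acc kw => acc ++ kwLoopA lowerL kw 0 (by omega)) []
  PySem.List.sorted positions (fun x => x.1) false

-- ===== PORT B =====
def keyword_positions_alt (text : String) (keywords : List String) : List (Int × String) :=
  let lowerL := PySem.Chars.lower text.toList
  (List.range (lowerL.length + 1)).flatMap (fun i =>
    keywords.filterMap (fun kw =>
      if PySem.Chars.startswith (lowerL.drop i) kw.toList then some ((i : Int), kw) else none))

-- ===== PRECONDITION & SPEC =====
def Spec_keyword_positions (text : String) (keywords : List String) (out : List (Int × String)) : Prop := out = keyword_positions_alt text keywords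
instance (text : String) (keywords : List String) (out : List (Int × String)) : Decidable (Spec_keyword_positions text keywords out) := by unfold Spec_keyword_positions; infer_instance

-- ===== CLAIM (what is proved, stated in full; the proofs are below) =====
def Claim_equal_keyword_positions : Prop := ∀ (text : String) (keywords : List String), Dom_keyword_positions text keywords → Spec_keyword_positions text keywords (keyword_positions text keywords)

-- ===== LEMMAS AND PROOFS =====

-- `mtc L kw i` : keyword kw matches the lowered text L at position i
def mtc (L : List Char) (kw : String) (i : Nat) : Bool :=
  PySem.Chars.startswith (List.drop i L) kw.toList

-- all matches of one keyword, keyword-major (what A's inner loop collects from start = 0)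
def occP (L : List Char) (kw : String) : List (Int × String) :=
  ((List.range (L.length + 1)).filter (fun i => mtc L kw i)).map (fun i : Nat => ((i : Int), kw))

-- all matches at one position, in keyword order (what B emits at position i)
def rowP (L : List Char) (kws : List String) (i : Nat) : List (Int × String) :=
  kws.flatMap (fun kw => if mtc L kw i then [((i : Int), kw)] else [])

theorem filter_range_none (N a : Nat) (q : Nat → Bool)
    (h : ∀ i, a ≤ i → i < N → q i = false) :
    (List.range N).filter (fun i => a ≤ i && q i) = [] := by
  rw [List.filter_eq_nil_iff]
  intro i hi
  simp only [List.mem_range] at hi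
  by_cases hai : a ≤ i
  · simp [hai, h i hai hi]
  · simp [hai]

theorem filter_range_first (N a b : Nat) (q : Nat → Bool) (hab : a ≤ b) (hbN : b < N)
    (hqb : q b = true) (hmin : ∀ i, a ≤ i → i < b → q i = false) :
    (List.range N).filter (fun i => a ≤ i && q i)
      = b :: (List.range N).filter (fun i => b + 1 ≤ i && q i) := by
  have hN : N = (b + 1) + (N - (b + 1)) := by omega
  rw [hN, List.range_add, List.range_succ]
  simp only [List.filter_append]
  have h1 : (List.range b).filter (fun i => a ≤ i && q i) = [] := by
    rw [List.filter_eq_nil_iff]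
    intro i hi
    simp only [List.mem_range] at hi
    by_cases hai : a ≤ i
    · simp [hai, hmin i hai hi]
    · simp [hai]
  have h2 : (List.range b).filter (fun i => b + 1 ≤ i && q i) = [] := by
    rw [List.filter_eq_nil_iff]
    intro i hi
    simp only [List.mem_range] at hi
    simp [show ¬ (b + 1 ≤ i) by omega]
  have h3 : ((List.range (N - (b+1))).map (fun x => b + 1 + x)).filter (fun i => a ≤ i && q i)
      = ((List.range (N - (b+1))).map (fun x => b + 1 + x)).filter (fun i => b + 1 ≤ i && q i) := by
    apply List.filter_congr
    intro i hi
    simp only [List.mem_map] at hi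
    obtain ⟨x, _, rfl⟩ := hi
    simp [show a ≤ b + 1 + x by omega, show b + 1 ≤ b + 1 + x by omega]
  rw [h1, h2, h3]
  simp [hab, hqb]

theorem kwLoopA_eq (L : List Char) (kw : String) (start : Nat) (hs : start ≤ L.length + 1) :
    kwLoopA L kw start hs
      = ((List.range (L.length + 1)).filter (fun i => start ≤ i && mtc L kw i)).map
          (fun i : Nat => ((i : Int), kw)) := by
  -- strong induction on the loop measure, mirroring the recursion of kwLoopA
  induction hfuel : L.length + 1 - start using Nat.strong_induction_on generalizing start with
  | _ fuel ih =>
    subst hfuel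
    rw [kwLoopA]
    by_cases h : PySem.Chars.findFrom L kw.toList (↑start) none < 0
    · rw [dif_pos h]
      have hfalse : ∀ i, start ≤ i → i < L.length + 1 → mtc L kw i = false := by
        intro i hsi hiN
        by_cases hsl : start ≤ L.length
        · have hm1 : PySem.Chars.findFrom L kw.toList (↑start) none = -1 := by
            have h1 := PySem.Chars.neg_one_le_find (List.drop start (List.take ((L.length : Int)).toNat L)) kw.toList
            have hnc := PySem.Chars.findFrom_natCast L kw.toList start hsl
            have h2 := PySem.Chars.neg_one_le_find (List.drop start L) kw.toList
            rw [hnc] at h ⊢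
            split at h
            · rw [if_pos (by assumption)]
            · omega
          have hni := (PySem.Chars.findFrom_natCast_eq_neg_one_iff L kw.toList start hsl).mp hm1
          by_contra hc
          apply hni
          have hpre : kw.toList <+: List.drop i L := by
            have := PySem.Chars.startswith_iff (List.drop i L) kw.toList
            simp only [mtc] at hc
            exact this.mp (by revert hc; cases PySem.Chars.startswith (List.drop i L) kw.toList <;> simp)
          have hdd : List.drop i L = List.drop (i - start) (List.drop start L) := by
            rw [List.drop_drop]; congr 1; omega
          rw [hdd] at hpre
          exact hpre.isInfix.trans (List.drop_suffix _ _).isInfix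
        · omega
      rw [filter_range_none _ _ _ hfalse]
      simp
    · rw [dif_neg h]
      have hb := pvFindFrom_bounds L kw.toList start hs h
      set idx := PySem.Chars.findFrom L kw.toList (↑start) none with hidx
      have hsl : start ≤ L.length := by omega
      have hspec := PySem.Chars.findFrom_natCast_spec L kw.toList start hsl (by omega)
      have hmatch : mtc L kw idx.toNat = true := by
        simp only [mtc]
        exact (PySem.Chars.startswith_iff _ _).mpr hspec.2.1
      have hmin : ∀ i, start ≤ i → i < idx.toNat → mtc L kw i = false := by
        intro i h1 h2
        have := hspec.2.2 i h1 h2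
        simp only [mtc]
        by_contra hc
        apply this
        exact (PySem.Chars.startswith_iff _ _).mp (by revert hc; cases PySem.Chars.startswith (List.drop i L) kw.toList <;> simp)
      rw [filter_range_first (L.length + 1) start idx.toNat _ (by omega) (by omega) hmatch hmin]
      dsimp only
      rw [List.map_cons]
      have hcast : ((idx.toNat : Int)) = idx := Int.toNat_of_nonneg (by omega)
      rw [hcast]
      congr 1
      exact ih (L.length + 1 - (idx.toNat + 1)) (by omega) (idx.toNat + 1) (by omega) rfl

theorem map_filter_eq_flatMap {α γ : Type} (l : List α) (q : α → Bool) (f : α → γ) :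
    (l.filter q).map f = l.flatMap (fun a => if q a then [f a] else []) := by
  induction l with
  | nil => simp
  | cons a t ih => by_cases h : q a <;> simp [h, ih]

theorem filterMap_ite_eq_flatMap {α γ : Type} (l : List α) (q : α → Bool) (f : α → γ) :
    l.filterMap (fun a => if q a then some (f a) else none)
      = l.flatMap (fun a => if q a then [f a] else []) := by
  induction l with
  | nil => simp
  | cons a t ih => by_cases h : q a <;> simp [h, ih]

theorem flatMap_append_perm {α γ : Type} (l : List α) (f g : α → List γ) :
    (l.flatMap (fun a => f a ++ g a)).Perm (l.flatMap f ++ l.flatMap g) := by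
  induction l with
  | nil => simp
  | cons a t ih =>
    simp only [List.flatMap_cons]
    refine (ih.append_left _).trans ?_
    have h2 := (List.perm_append_comm_assoc (g a) (t.flatMap f) (t.flatMap g)).append_left (f a)
    simpa [List.append_assoc] using h2

theorem flatMap_swap_perm {α β γ : Type} (as : List α) (bs : List β) (f : α → β → List γ) :
    (as.flatMap fun a => bs.flatMap (f a)).Perm
      (bs.flatMap fun b => as.flatMap (fun a => f a b)) := by
  induction as with
  | nil => simp
  | cons a t ih =>
    simp only [List.flatMap_cons]
    refine (ih.append_left (bs.flatMap (f a))).trans ?_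
    exact (flatMap_append_perm bs (f a) (fun b => t.flatMap (fun a' => f a' b))).symm

theorem filter_insertBy (x : Int × String) (ys : List (Int × String))
    (hys : ys.Pairwise (fun a b => a.1 ≤ b.1)) (k : Int) :
    (PySem.List.insertBy (fun a b => decide (a.1 < b.1)) x ys).filter (fun y => y.1 == k)
      = if x.1 == k then ys.filter (fun y => y.1 == k) ++ [x]
        else ys.filter (fun y => y.1 == k) := by
  induction ys with
  | nil =>
    simp only [PySem.List.insertBy]
    by_cases hx : x.1 == k <;> simp [hx]
  | cons y t ih =>
    rw [List.pairwise_cons] at hys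
    by_cases hxy : x.1 < y.1
    · simp only [PySem.List.insertBy, hxy, decide_true, if_true]
      by_cases hxk : x.1 == k
      · have hnil : (y :: t).filter (fun z => z.1 == k) = [] := by
          rw [List.filter_eq_nil_iff]
          intro z hz
          have hyz : y.1 ≤ z.1 := by
            rcases hz with _ | hz
            · exact le_refl _
            · exact hys.1 z (by assumption)
          simp only [beq_iff_eq] at hxk ⊢
          omega
        simp [hxk, hnil]
      · simp [hxk]
    · simp only [PySem.List.insertBy, hxy, decide_false, Bool.false_eq_true, if_false]
      rw [List.filter_cons, ih hys.2, List.filter_cons]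
      by_cases hyk : y.1 == k <;> by_cases hxk : x.1 == k <;> simp [hyk, hxk]

theorem sorted_filter_stable (xs : List (Int × String)) (k : Int) :
    (PySem.List.sorted xs (fun x => x.1) false).filter (fun y => y.1 == k)
      = xs.filter (fun y => y.1 == k) := by
  induction xs using List.reverseRecOn with
  | nil => rfl
  | append_singleton t x ih =>
    rw [PySem.List.sorted_eq_foldl_insertBy, List.foldl_append, List.foldl_cons, List.foldl_nil,
      ← PySem.List.sorted_eq_foldl_insertBy]
    rw [filter_insertBy x _ (PySem.List.sorted_pairwise t (fun x => x.1)) k, ih]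
    rw [List.filter_append, List.filter_cons, List.filter_nil]
    by_cases hxk : x.1 == k <;> simp [hxk]

theorem stableUnique (L : List (Int × String)) :
    ∀ (M : List (Int × String)), L.Perm M →
      L.Pairwise (fun a b => a.1 ≤ b.1) → M.Pairwise (fun a b => a.1 ≤ b.1) →
      (∀ k : Int, L.filter (fun x => x.1 == k) = M.filter (fun x => x.1 == k)) →
      L = M := by
  induction L with
  | nil =>
    intro M hperm _ _ _
    exact hperm.nil_eq
  | cons x L' ih =>
    intro M hperm hL hM hf
    cases M with
    | nil => exact absurd hperm.symm.nil_eq (by simp)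
    | cons y M' =>
      rw [List.pairwise_cons] at hL hM
      have hxy : x.1 = y.1 := by
        have hyL : y ∈ x :: L' := hperm.symm.subset (List.mem_cons_self)
        have hxM : x ∈ y :: M' := hperm.subset (List.mem_cons_self)
        have h1 : x.1 ≤ y.1 := by
          rcases hyL with _ | hy
          · exact le_refl _
          · exact hL.1 y (by assumption)
        have h2 : y.1 ≤ x.1 := by
          rcases hxM with _ | hx
          · exact le_refl _
          · exact hM.1 x (by assumption)
        omega
      have hfx := hf x.1
      rw [List.filter_cons, List.filter_cons, if_pos (by simp),
        if_pos (by simp [hxy.symm])] at hfx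
      injection hfx with h1 _h2
      subst h1
      have hftails : ∀ k : Int, L'.filter (fun z => z.1 == k) = M'.filter (fun z => z.1 == k) := by
        intro k
        have hk := hf k
        rw [List.filter_cons, List.filter_cons] at hk
        by_cases hxk : x.1 == k
        · rw [if_pos hxk, if_pos hxk] at hk
          injection hk
        · rw [if_neg hxk, if_neg hxk] at hk
          exact hk
      rw [ih M' hperm.cons_inv hL.2 hM.2 hftails]

theorem keyword_positions_eq (text : String) (keywords : List String) :
    keyword_positions text keywords
      = PySem.List.sorted (keywords.flatMap (occP (PySem.Chars.lower text.toList)))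
          (fun x => x.1) false := by
  unfold keyword_positions
  dsimp only
  congr 1
  rw [PySem.List.foldl_congr_mem _ _
    (fun acc kw => acc ++ occP (PySem.Chars.lower text.toList) kw) _ ?_]
  · rw [PySem.List.foldl_append_eq_flatMap]
    simp
  · intro acc kw _
    rw [kwLoopA_eq]
    unfold occP
    simp

theorem alt_eq (text : String) (keywords : List String) :
    keyword_positions_alt text keywords
      = (List.range ((PySem.Chars.lower text.toList).length + 1)).flatMap
          (rowP (PySem.Chars.lower text.toList) keywords) := by
  unfold keyword_positions_alt rowP
  dsimp only
  congr 1
  funext i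
  rw [filterMap_ite_eq_flatMap (f := fun kw => ((i : Int), kw))]
  rfl

theorem kwMajor_perm_pos (L : List Char) (kws : List String) :
    (kws.flatMap (occP L)).Perm ((List.range (L.length + 1)).flatMap (rowP L kws)) := by
  have hocc : ∀ kw, occP L kw
      = (List.range (L.length + 1)).flatMap (fun i => if mtc L kw i then [((i : Int), kw)] else []) := by
    intro kw
    unfold occP
    rw [map_filter_eq_flatMap]
  rw [List.flatMap_congr (fun kw _ => hocc kw)]
  exact flatMap_swap_perm kws (List.range (L.length + 1)) _

theorem pairwise_rowFlat (L : List Char) (kws : List String) (N : Nat) :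
    ((List.range N).flatMap (rowP L kws)).Pairwise (fun a b => a.1 ≤ b.1) := by
  have hkey : ∀ i, ∀ x ∈ rowP L kws i, x.1 = (i : Int) := by
    intro i x hx
    unfold rowP at hx
    simp only [List.mem_flatMap] at hx
    obtain ⟨kw, _, hmem⟩ := hx
    split at hmem
    · simp only [List.mem_singleton] at hmem; rw [hmem]
    · simp at hmem
  rw [List.flatMap_def, List.pairwise_flatten]
  refine ⟨?_, ?_⟩
  · intro l hl
    simp only [List.mem_map] at hl
    obtain ⟨i, _, rfl⟩ := hl
    apply List.pairwise_of_forall_mem_list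
    intro x hx y hy
    rw [hkey i x hx, hkey i y hy]
  · rw [List.pairwise_map]
    apply List.pairwise_lt_range.imp
    intro i j hij x hx y hy
    rw [hkey i x hx, hkey j y hy]
    omega

theorem filter_range_eq_single (N j : Nat) (q : Nat → Bool) (hj : j < N) :
    (List.range N).filter (fun i => (i == j) && q i) = if q j then [j] else [] := by
  induction N with
  | zero => omega
  | succ N ihN =>
    rw [List.range_succ, List.filter_append]
    by_cases hjN : j < N
    · rw [ihN hjN]
      have hN : [N].filter (fun i => (i == j) && q i) = [] := by
        simp [show (N == j) = false by simp; omega]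
      rw [hN, List.append_nil]
    · have hjN' : j = N := by omega
      subst hjN'
      have hR : (List.range j).filter (fun i => (i == j) && q i) = [] := by
        rw [List.filter_eq_nil_iff]
        intro i hi
        simp only [List.mem_range] at hi
        simp [show (i == j) = false by simp; omega]
      rw [hR, List.nil_append]
      by_cases hq : q j <;> simp [hq]

theorem occP_filter (L : List Char) (kw : String) (j : Nat) (hj : j < L.length + 1) :
    (occP L kw).filter (fun x => x.1 == (j : Int))
      = if mtc L kw j then [((j : Int), kw)] else [] := by
  unfold occP
  rw [List.filter_map]
  have hcomp : ((fun x : Int × String => x.1 == (j : Int)) ∘ (fun i : Nat => ((i : Int), kw)))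
      = fun i : Nat => i == j := by
    funext i
    by_cases h : i = j <;> simp [Function.comp, h]
  rw [hcomp, List.filter_filter]
  have hcong : (List.range (L.length + 1)).filter (fun i => (i == j) && mtc L kw i)
      = if mtc L kw j then [j] else [] := filter_range_eq_single _ j _ hj
  rw [hcong]
  by_cases hm : mtc L kw j <;> simp [hm]

theorem rowP_key (L : List Char) (kws : List String) (i : Nat) :
    ∀ x ∈ rowP L kws i, x.1 = (i : Int) := by
  intro x hx
  unfold rowP at hx
  simp only [List.mem_flatMap] at hx
  obtain ⟨kw, _, hmem⟩ := hx
  split at hmem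
  · simp only [List.mem_singleton] at hmem; rw [hmem]
  · simp at hmem

theorem rowP_filter (L : List Char) (kws : List String) (i j : Nat) :
    (rowP L kws i).filter (fun x => x.1 == (j : Int))
      = if i = j then rowP L kws j else [] := by
  by_cases hij : i = j
  · subst hij
    rw [if_pos rfl, List.filter_eq_self]
    intro x hx
    simp [rowP_key L kws i x hx]
  · rw [if_neg hij, List.filter_eq_nil_iff]
    intro x hx
    rw [rowP_key L kws i x hx]
    simp
    omega

theorem flatMap_single {γ : Type} (N j : Nat) (hj : j < N) (g : Nat → List γ)
    (h : ∀ i, i < N → i ≠ j → g i = []) :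
    (List.range N).flatMap g = g j := by
  induction N with
  | zero => omega
  | succ N ihN =>
    rw [List.range_succ, List.flatMap_append, List.flatMap_cons, List.flatMap_nil,
      List.append_nil]
    by_cases hjN : j < N
    · rw [ihN hjN (fun i hi => h i (by omega)), h N (by omega) (by omega), List.append_nil]
    · have hjN' : j = N := by omega
      subst hjN'
      have hz : (List.range j).flatMap g = [] := by
        rw [List.flatMap_eq_nil_iff]
        intro i hi
        simp only [List.mem_range] at hi
        exact h i (by omega) (by omega)
      rw [hz, List.nil_append]

theorem filter_kwMajor (L : List Char) (kws : List String) (k : Int) :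
    (kws.flatMap (occP L)).filter (fun x => x.1 == k)
      = (((List.range (L.length + 1)).flatMap (rowP L kws)).filter (fun x => x.1 == k)) := by
  rw [List.filter_flatMap, List.filter_flatMap]
  by_cases hk : ∃ j, j < L.length + 1 ∧ (j : Int) = k
  · obtain ⟨j, hjN, rfl⟩ := hk
    have hLside : kws.flatMap (fun kw => (occP L kw).filter (fun x => x.1 == (j : Int)))
        = rowP L kws j := by
      unfold rowP
      exact List.flatMap_congr (fun kw _ => occP_filter L kw j hjN)
    rw [hLside, List.flatMap_congr (fun i (_ : i ∈ List.range (L.length + 1)) => rowP_filter L kws i j)]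
    rw [flatMap_single _ j hjN _ (fun i _ hij => by simp [hij])]
    simp
  · push Not at hk
    have h1 : kws.flatMap (fun kw => (occP L kw).filter (fun x => x.1 == k))
        = kws.flatMap (fun _ => ([] : List (Int × String))) := by
      apply List.flatMap_congr
      intro kw _
      rw [List.filter_eq_nil_iff]
      intro x hx
      unfold occP at hx
      simp only [List.mem_map, List.mem_filter, List.mem_range] at hx
      obtain ⟨i, ⟨hiN, _⟩, rfl⟩ := hx
      simp only [beq_iff_eq]
      exact fun hc => hk i hiN hc
    have h2 : (List.range (L.length + 1)).flatMap (fun i => (rowP L kws i).filter (fun x => x.1 == k))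
        = (List.range (L.length + 1)).flatMap (fun _ => ([] : List (Int × String))) := by
      apply List.flatMap_congr
      intro i hi
      simp only [List.mem_range] at hi
      rw [List.filter_eq_nil_iff]
      intro x hx
      rw [rowP_key L kws i x hx]
      simp only [beq_iff_eq]
      exact fun hc => hk i hi hc
    rw [h1, h2, List.flatMap_eq_nil_iff.mpr (fun _ _ => rfl),
      List.flatMap_eq_nil_iff.mpr (fun _ _ => rfl)]

-- ===== VERDICT (by name: the statement is the Claim_ definition above) =====
theorem keyword_positions_spec : Claim_equal_keyword_positions := by
  intro text keywords _hdom
  unfold Spec_keyword_positions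
  rw [keyword_positions_eq, alt_eq]
  apply stableUnique
  · exact (PySem.List.sorted_perm _ _ _).trans (kwMajor_perm_pos _ _)
  · exact PySem.List.sorted_pairwise _ _
  · exact pairwise_rowFlat _ _ _
  · intro k
    exact (sorted_filter_stable _ _).trans (filter_kwMajor _ _ k)
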